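-- pv_equiv track=rewrite | github.com/shaneholloman/ultimate-bug-scanner | modules/helpers/resource_lifecycle_ruby.py | strip_comments_and_strings
-- ===== SOURCE A (Python) =====
-- def strip_comments_and_strings(text: str) -> str:
--     result: list[str] = []
--     i = 0
--     n = len(text)
--     in_comment = False
--     in_string = False
--     escaped = False
--     quote = ""
--
--     def mask_char(ch: str) -> str:
--         return "\n" if ch == "\n" else " "
--
--     while i < n:
--         ch = text[i]
--
--         if in_comment:
--             result.append(mask_char(ch))
--             if ch == "\n":
--                 in_comment = False
--             i += 1
--             continue
--
--         if in_string:
--             result.append(mask_char(ch))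
--             if escaped:
--                 escaped = False
--             elif ch == "\\":
--                 escaped = True
--             elif ch == quote:
--                 in_string = False
--             i += 1
--             continue
--
--         if ch == "#":
--             in_comment = True
--             result.append(" ")
--             i += 1
--             continue
--
--         if ch in {"'", '"'}:
--             in_string = True
--             quote = ch
--             result.append(mask_char(ch))
--             i += 1
--             continue
--
--         result.append(ch)
--         i += 1
--
--     return "".join(result)
-- ===== SOURCE B (Python) =====
-- def strip_comments_and_strings(text: str) -> str:
--     # Region-based scan: find each comment/string span and mask it wholesale,
--     # copying clean characters verbatim.
--     out: list[str] = []
--     i, n = 0, len(text)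
--     while i < n:
--         ch = text[i]
--         if ch == "#":
--             j = text.find("\n", i)
--             if j == -1:
--                 j = n
--             out.append(" " * (j - i))
--             i = j
--         elif ch in ("'", '"'):
--             j = i + 1
--             while j < n:
--                 c = text[j]
--                 if c == "\\":
--                     j += 2
--                 elif c == ch:
--                     j += 1
--                     break
--                 else:
--                     j += 1
--             j = min(j, n)
--             out.append("".join("\n" if c == "\n" else " " for c in text[i:j]))
--             i = j
--         else:
--             out.append(ch)
--             i += 1
--     return "".join(out)
-- ===== Notes on version B (the rewrite author's own statement) =====
-- stated objective: alternative
-- what changed: Replaced A's per-character state machine (in_comment/in_string/escaped flags carried across every character) by a region-based scan that finds each comment span (to the next newline) or string span (escape-aware scan to the closing quote) and masks the whole span at once, copying clean characters verbatim.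
import Mathlib
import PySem

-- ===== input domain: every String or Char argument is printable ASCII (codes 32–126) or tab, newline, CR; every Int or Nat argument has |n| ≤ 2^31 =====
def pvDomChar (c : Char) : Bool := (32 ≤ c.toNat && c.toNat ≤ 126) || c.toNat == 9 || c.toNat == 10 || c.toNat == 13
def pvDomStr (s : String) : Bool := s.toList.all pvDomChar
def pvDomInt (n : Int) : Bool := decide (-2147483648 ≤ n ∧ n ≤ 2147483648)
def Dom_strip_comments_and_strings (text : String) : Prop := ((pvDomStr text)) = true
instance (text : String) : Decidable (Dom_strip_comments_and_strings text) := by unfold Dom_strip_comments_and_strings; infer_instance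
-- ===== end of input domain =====

-- B replaces A's per-character state machine (in_comment/in_string/escaped flags) by a
-- region-based scan that locates each comment/string span and masks it wholesale (alternative decomposition).


-- ===== PORT A =====
-- mask_char helper of A
def pvMaskChar (ch : Char) : Char := if ch = '\n' then '\n' else ' '

-- the while loop of A over the remaining characters, carrying A's state
-- (in_comment, in_string, escaped, quote); Python's quote starts as "" and is
-- only read while in_string, so it is carried as a Char (initial value unread).
def pvGoA : List Char → Bool → Bool → Bool → Char → List Char
  | [], _, _, _, _ => []
  | ch :: rest, inComment, inString, escaped, quote =>
    if inComment then
      pvMaskChar ch :: pvGoA rest (if ch = '\n' then false else true) inString escaped quote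
    else if inString then
      pvMaskChar ch ::
        (if escaped then pvGoA rest inComment inString false quote
         else if ch = '\\' then pvGoA rest inComment inString true quote
         else if ch = quote then pvGoA rest inComment false escaped quote
         else pvGoA rest inComment inString escaped quote)
    else if ch = '#' then
      ' ' :: pvGoA rest true inString escaped quote
    else if ch = '\'' ∨ ch = '"' then
      pvMaskChar ch :: pvGoA rest inComment true escaped ch
    else
      ch :: pvGoA rest inComment inString escaped quote

def strip_comments_and_strings (text : String) : String :=
  String.ofList (pvGoA text.toList false false false ' ')

-- ===== PORT B =====
-- B's inner string scan: consume characters up to and including the closing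
-- quote (an escape consumes the next character; an unterminated string, or a
-- trailing lone backslash, consumes to the end); returns (consumed, rest).
def pvSkipStr (q : Char) : List Char → List Char × List Char
  | [] => ([], [])
  | c :: cs =>
    if c = '\\' then
      match cs with
      | [] => ([c], [])
      | d :: ds => let p := pvSkipStr q ds; (c :: d :: p.1, p.2)
    else if c = q then ([c], cs)
    else let p := pvSkipStr q cs; (c :: p.1, p.2)

theorem pvSkipStr_len (q : Char) : ∀ l : List Char, (pvSkipStr q l).2.length ≤ l.length
  | [] => by rw [pvSkipStr.eq_def]
  | c :: cs => by
    rw [pvSkipStr.eq_def]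
    by_cases hb : c = '\\'
    · subst hb
      cases cs with
      | nil => simp
      | cons d ds =>
        have := pvSkipStr_len q ds
        simp only [reduceIte, List.length_cons]
        omega
    · by_cases he : c = q
      · subst he
        simp [hb]
      · have := pvSkipStr_len q cs
        simp only [hb, he, List.length_cons, reduceIte]
        omega

-- B's outer loop: copy clean characters, mask whole comment/string regions.
def pvGoB : List Char → List Char
  | [] => []
  | ch :: rest =>
    if ch = '#' then
      let com := rest.takeWhile (fun c => c ≠ '\n')
      ' ' :: (com.map (fun _ => ' ') ++ pvGoB (rest.dropWhile (fun c => c ≠ '\n')))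
    else if ch = '\'' ∨ ch = '"' then
      let p := pvSkipStr ch rest
      pvMaskChar ch :: (p.1.map pvMaskChar ++ pvGoB p.2)
    else
      ch :: pvGoB rest
  termination_by l => l.length
  decreasing_by
  · have := List.length_dropWhile_le (fun c => decide (c ≠ '\n')) rest
    simp only [List.length_cons]; omega
  · have := pvSkipStr_len ch rest
    simp only [List.length_cons]; omega
  · simp

def strip_comments_and_strings_alt (text : String) : String :=
  String.ofList (pvGoB text.toList)

-- ===== PRECONDITION & SPEC =====
def Spec_strip_comments_and_strings (text : String) (out : String) : Prop := out = strip_comments_and_strings_alt text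
instance (text : String) (out : String) : Decidable (Spec_strip_comments_and_strings text out) := by unfold Spec_strip_comments_and_strings; infer_instance

-- ===== CLAIM (what is proved, stated in full; the proofs are below) =====
def Claim_equal_strip_comments_and_strings : Prop := ∀ (text : String), Dom_strip_comments_and_strings text → Spec_strip_comments_and_strings text (strip_comments_and_strings text)

-- ===== LEMMAS AND PROOFS =====

-- A in comment state masks everything up to the next newline with spaces and
-- then continues in the clean state (the newline itself is handled identically
-- by the comment exit and by the clean state: both emit '\n').
theorem pvA_comment (q : Char) : ∀ l : List Char,
    pvGoA l true false false q =
      (l.takeWhile (fun c => c ≠ '\n')).map (fun _ => ' ')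
        ++ pvGoA (l.dropWhile (fun c => c ≠ '\n')) false false false q
  | [] => by simp [pvGoA]
  | c :: cs => by
    by_cases h : c = '\n'
    · subst h
      simp [pvGoA, pvMaskChar, List.takeWhile, List.dropWhile]
    · have := pvA_comment q cs
      simp [pvGoA, pvMaskChar, List.takeWhile, List.dropWhile, h, this]

-- A in string state (not escaped) masks exactly the pvSkipStr region and
-- continues clean on the rest.
theorem pvA_string (q : Char) (hq : q ≠ '\\') : ∀ l : List Char,
    pvGoA l false true false q =
      (pvSkipStr q l).1.map pvMaskChar ++ pvGoA (pvSkipStr q l).2 false false false q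
  | [] => by rw [pvSkipStr.eq_def]; simp [pvGoA]
  | c :: cs => by
    rw [pvSkipStr.eq_def]
    by_cases hb : c = '\\'
    · subst hb
      match cs with
      | [] => simp [pvGoA]
      | d :: ds =>
        have := pvA_string q hq ds
        simp [pvGoA, this]
    · by_cases he : c = q
      · subst he
        simp [pvGoA, hb]
      · have := pvA_string q hq cs
        simp [pvGoA, hb, he, this]

-- main equivalence of the two loops, for any quote register value
theorem pvGo_eq (q : Char) (l : List Char) : pvGoA l false false false q = pvGoB l := by
  induction hn : l.length using Nat.strong_induction_on generalizing l q with
  | _ n ih =>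
  match l with
  | [] => simp [pvGoA, pvGoB]
  | c :: cs =>
    subst hn
    by_cases hh : c = '#'
    · subst hh
      have hlen : (cs.dropWhile (fun c => c ≠ '\n')).length < ('#' :: cs).length := by
        have := List.length_dropWhile_le (fun c => decide (c ≠ '\n')) cs
        simp only [List.length_cons]; omega
      have h1 : pvGoA ('#' :: cs) false false false q = ' ' :: pvGoA cs true false false q := by
        simp [pvGoA]
      rw [h1, pvA_comment q cs, ih _ hlen q _ rfl, pvGoB]
      simp
    · by_cases hs : c = '\'' ∨ c = '"'
      · have hcq : c ≠ '\\' := by rcases hs with h | h <;> subst h <;> decide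
        have hlen : (pvSkipStr c cs).2.length < (c :: cs).length := by
          have := pvSkipStr_len c cs
          simp only [List.length_cons]; omega
        have h1 : pvGoA (c :: cs) false false false q =
            pvMaskChar c :: pvGoA cs false true false c := by
          simp [pvGoA, hh, hs]
        rw [h1, pvA_string c hcq cs, ih _ hlen c _ rfl, pvGoB]
        simp [hh, hs]
      · have h1 : pvGoA (c :: cs) false false false q = c :: pvGoA cs false false false q := by
          simp [pvGoA, hh, hs]
        rw [h1, ih cs.length (by simp) q cs rfl, pvGoB]
        simp [hh, hs]

-- ===== VERDICT (by name: the statement is the Claim_ definition above) =====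
theorem strip_comments_and_strings_spec : Claim_equal_strip_comments_and_strings := by
  intro text _
  unfold Spec_strip_comments_and_strings strip_comments_and_strings strip_comments_and_strings_alt
  rw [pvGo_eq]
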